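-- pv_equiv track=rewrite | github.com/lashaTsadzikidze/vigenere-cipher | main.py | repeat_key
-- ===== SOURCE A (Python) =====
-- import string
--
-- def repeat_key(message, key):
--     key_repeat = ''
--     key_index = 0
--     for char in message:
--         if char in string.ascii_uppercase:
--             key_repeat += key[key_index % len(key)].upper()
--             key_index += 1
--         elif char in string.ascii_lowercase:
--             key_repeat += key[key_index % len(key)].lower()
--             key_index += 1
--         else:
--             key_repeat += char
--
--     return key_repeat
-- ===== SOURCE B (Python) =====
-- import string
--
-- def repeat_key(message, key):
--     # pass 1: record the indices of the alphabetic characters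
--     positions = [i for i, c in enumerate(message)
--                  if c in string.ascii_uppercase or c in string.ascii_lowercase]
--     # pass 2: overwrite exactly those slots of a copy of the message with key letters
--     out = list(message)
--     for j, i in enumerate(positions):
--         k = key[j % len(key)]
--         out[i] = k.upper() if message[i] in string.ascii_uppercase else k.lower()
--     return ''.join(out)
-- ===== Notes on version B (the rewrite author's own statement) =====
-- stated objective: alternative
-- what changed: Instead of one accumulator loop appending a char per message character, B first collects the index list of alphabetic positions and then overwrites exactly those slots of a mutable copy of the message with case-adjusted key letters, joining at the end; non-letters are never touched.
import Mathlib
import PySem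

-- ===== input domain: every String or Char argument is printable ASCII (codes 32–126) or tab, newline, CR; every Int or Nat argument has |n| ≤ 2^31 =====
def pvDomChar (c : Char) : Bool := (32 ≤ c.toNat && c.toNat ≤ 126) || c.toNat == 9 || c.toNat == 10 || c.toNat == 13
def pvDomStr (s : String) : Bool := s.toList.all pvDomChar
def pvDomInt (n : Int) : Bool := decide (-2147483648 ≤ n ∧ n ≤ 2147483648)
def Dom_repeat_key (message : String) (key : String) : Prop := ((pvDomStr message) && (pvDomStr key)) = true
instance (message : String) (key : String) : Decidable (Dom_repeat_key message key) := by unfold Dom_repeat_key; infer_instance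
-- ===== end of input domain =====

-- B collects the letter positions first and then overwrites exactly those slots of a copy of the
-- message with key letters; A appends character by character with a running key index.

-- ===== PORT A =====
def pvUpperL : List Char := "ABCDEFGHIJKLMNOPQRSTUVWXYZ".toList  -- string.ascii_uppercase
def pvLowerL : List Char := "abcdefghijklmnopqrstuvwxyz".toList  -- string.ascii_lowercase

-- key[i % len(key)]; Python raises ZeroDivisionError for len(key) = 0 — excluded by Pre_,
-- default never reached inside Pre_.  i and len(key) are nonnegative, so Nat % is exact here.
def pvKeyAt (key : List Char) (i : Nat) : Char := key.getD (i % key.length) 'a'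

def pvStepA (ks : List Char) (st : List Char × Nat) (c : Char) : List Char × Nat :=
  if pvUpperL.contains c then (st.1 ++ [PySem.Chars.upperChar (pvKeyAt ks st.2)], st.2 + 1)
  else if pvLowerL.contains c then (st.1 ++ [PySem.Chars.lowerChar (pvKeyAt ks st.2)], st.2 + 1)
  else (st.1 ++ [c], st.2)

def repeat_key (message : String) (key : String) : String :=
  String.mk (message.toList.foldl (pvStepA key.toList) ([], 0)).1

-- ===== PORT B =====
-- out[i] = … / message[i]: both indices come from enumerate, hence nonnegative and in range,
-- so List.set / getD at .toNat are exact here (defaults unreachable).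
def repeat_key_alt (message : String) (key : String) : String :=
  let ms := message.toList
  let positions := ((PySem.List.enumerate ms).filter
      (fun p => pvUpperL.contains p.2 || pvLowerL.contains p.2)).map Prod.fst
  let out := (PySem.List.enumerate positions).foldl
    (fun out ji =>
      let k := pvKeyAt key.toList ji.1.toNat
      out.set ji.2.toNat
        (if pvUpperL.contains (ms.getD ji.2.toNat ' ')
         then PySem.Chars.upperChar k else PySem.Chars.lowerChar k))
    ms
  String.mk out

-- ===== PRECONDITION & SPEC =====
def pvIsLetter (c : Char) : Bool := pvUpperL.contains c || pvLowerL.contains c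

-- Pre_ excludes exactly the inputs where both Pythons raise ZeroDivisionError: empty key with an alphabetic char in the message.
def Pre_repeat_key (message : String) (key : String) : Prop :=
  key.toList ≠ [] ∨ ∀ c ∈ message.toList, pvIsLetter c = false
instance (message : String) (key : String) : Decidable (Pre_repeat_key message key) := by
  unfold Pre_repeat_key; infer_instance

def pvWitness_repeat_key : String × String := ("Hello, World!", "key")

def Spec_repeat_key (message : String) (key : String) (out : String) : Prop := out = repeat_key_alt message key
instance (message : String) (key : String) (out : String) : Decidable (Spec_repeat_key message key out) := by unfold Spec_repeat_key; infer_instance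

-- ===== CLAIM (what is proved, stated in full; the proofs are below) =====
def Claim_equal_repeat_key : Prop := ∀ (message : String) (key : String), Dom_repeat_key message key → Pre_repeat_key message key → Spec_repeat_key message key (repeat_key message key)

-- ===== LEMMAS AND PROOFS =====

-- A's loop as a direct recursion (proof helper only)
def pvALoop (ks : List Char) : List Char → Nat → List Char
  | [], _ => []
  | c :: cs, i =>
    if pvUpperL.contains c then PySem.Chars.upperChar (pvKeyAt ks i) :: pvALoop ks cs (i + 1)
    else if pvLowerL.contains c then PySem.Chars.lowerChar (pvKeyAt ks i) :: pvALoop ks cs (i + 1)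
    else c :: pvALoop ks cs i

theorem pvFoldA (ks : List Char) (cs : List Char) :
    ∀ (acc : List Char) (i : Nat),
      (cs.foldl (pvStepA ks) (acc, i)).1 = acc ++ pvALoop ks cs i := by
  induction cs with
  | nil => intro acc i; simp [pvALoop]
  | cons c cs ih =>
    intro acc i
    simp only [List.foldl_cons, pvStepA, pvALoop]
    split_ifs <;> simp [ih]

-- the absolute letter positions of a suffix starting at index p (proof helper only)
def pvPosFrom (p : Int) : List Char → List Int
  | [] => []
  | c :: cs => if pvIsLetter c then p :: pvPosFrom (p + 1) cs else pvPosFrom (p + 1) cs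

theorem pvPositionsEq (cs : List Char) : ∀ (p : Int),
    ((PySem.List.enumerate cs p).filter (fun q => pvUpperL.contains q.2 || pvLowerL.contains q.2)).map Prod.fst
      = pvPosFrom p cs := by
  induction cs with
  | nil => intro p; simp [PySem.List.enumerate_nil, pvPosFrom]
  | cons c cs ih =>
    intro p
    simp only [PySem.List.enumerate_cons, List.filter_cons, pvPosFrom, pvIsLetter]
    split_ifs <;> simp_all

theorem pvSetLoop (ks ms : List Char) : ∀ (cs pref : List Char) (j : Nat),
    ms.drop pref.length = cs →
    ((PySem.List.enumerate (pvPosFrom (pref.length : Int) cs) (j : Int)).foldl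
      (fun out ji =>
        let k := pvKeyAt ks ji.1.toNat
        out.set ji.2.toNat
          (if pvUpperL.contains (ms.getD ji.2.toNat ' ')
           then PySem.Chars.upperChar k else PySem.Chars.lowerChar k))
      (pref ++ cs))
    = pref ++ pvALoop ks cs j := by
  intro cs
  induction cs with
  | nil => intro pref j _; simp [pvPosFrom, PySem.List.enumerate_nil, pvALoop]
  | cons c cs ih =>
    intro pref j hdrop
    have hms : ms[pref.length]? = some c := by
      have h0 : (ms.drop pref.length)[0]? = ms[pref.length + 0]? := List.getElem?_drop
      rw [hdrop] at h0; simpa using h0.symm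
    have hget : ms.getD pref.length ' ' = c := by simp [List.getD, hms]
    have hdrop' : ms.drop (pref.length + 1) = cs := by
      have : ms.drop (pref.length + 1) = (ms.drop pref.length).drop 1 := by
        rw [List.drop_drop]
      rw [this, hdrop]; rfl
    have hset : ∀ x : Char, (pref ++ c :: cs).set pref.length x = pref ++ x :: cs := by
      intro x
      rw [List.set_append_right _ _ le_rfl]
      simp
    by_cases hL : pvIsLetter c = true
    · have hj1 : ((j : Int) + 1) = ((j + 1 : Nat) : Int) := by push_cast; ring
      simp only [pvPosFrom, hL, if_pos, PySem.List.enumerate_cons, List.foldl_cons, hj1]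
      have hlen : (pref ++ [if pvUpperL.contains (ms.getD pref.length ' ')
           then PySem.Chars.upperChar (pvKeyAt ks j) else PySem.Chars.lowerChar (pvKeyAt ks j)]).length
           = pref.length + 1 := by simp
      have key : ∀ x : Char,
          ((PySem.List.enumerate (pvPosFrom (pref.length + 1) cs) ((j + 1 : Nat) : Int)).foldl
            (fun out ji =>
              let k := pvKeyAt ks ji.1.toNat
              out.set ji.2.toNat
                (if pvUpperL.contains (ms.getD ji.2.toNat ' ')
                 then PySem.Chars.upperChar k else PySem.Chars.lowerChar k))
            ((pref ++ [x]) ++ cs))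
          = (pref ++ [x]) ++ pvALoop ks cs (j + 1) := by
        intro x
        have := ih (pref ++ [x]) (j + 1) (by simpa using hdrop')
        simpa using this
      simp only [Int.toNat_natCast, hget, hset]
      unfold pvIsLetter at hL
      rcases Bool.or_eq_true _ _ |>.mp hL with hU | hlo
      · simp only [pvALoop, hU, if_pos]
        have := key (PySem.Chars.upperChar (pvKeyAt ks j))
        simpa [hU] using this
      · by_cases hU : pvUpperL.contains c = true
        · simp only [pvALoop, hU, if_pos]
          have := key (PySem.Chars.upperChar (pvKeyAt ks j))
          simpa [hU] using this
        · simp only [pvALoop, hU, hlo, if_pos]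
          have := key (PySem.Chars.lowerChar (pvKeyAt ks j))
          simp only [Bool.not_eq_true] at hU
          simpa [hU] using this
    · have h1 : pvUpperL.contains c = false := by
        revert hL; unfold pvIsLetter; cases pvUpperL.contains c <;> simp
      have h2 : pvLowerL.contains c = false := by
        revert hL; unfold pvIsLetter; cases pvLowerL.contains c <;> simp
      have hLf : pvIsLetter c = false := by simpa using hL
      have h1' : c ∉ pvUpperL := by simpa using h1
      have h2' : c ∉ pvLowerL := by simpa using h2
      have hALoop : pvALoop ks (c :: cs) j = c :: pvALoop ks cs j := by
        simp [pvALoop, h1', h2']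
      rw [hALoop]
      simp only [pvPosFrom, hLf, Bool.false_eq_true, if_false]
      have := ih (pref ++ [c]) j (by simpa using hdrop')
      simpa [List.append_assoc] using this

-- ===== VERDICT (by name: the statement is the Claim_ definition above) =====
theorem repeat_key_spec : Claim_equal_repeat_key := by
  intro message key _ _
  unfold Spec_repeat_key repeat_key repeat_key_alt
  rw [pvFoldA key.toList message.toList [] 0, List.nil_append]
  have hpos := pvPositionsEq message.toList 0
  have hloop := pvSetLoop key.toList message.toList message.toList [] 0 (by simp)
  simp only [List.length_nil, List.nil_append] at hloop
  simp only [Int.natCast_zero] at hpos hloop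
  simp only [hpos, hloop]
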